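-- pv_equiv track=rewrite | github.com/dmmiller/adventofcode | 2018/day5/solution.py | computeLength
-- ===== SOURCE A (Python) =====
-- from collections import deque
--
-- def computeLength(s: str) -> int:
--     stack = deque()
--
--     for c in s:
--         if len(stack) == 0:
--             stack.append(c)
--         else:
--             if abs(ord(c) - ord(stack[-1])) == 32:
--                 stack.pop()
--             else:
--                 stack.append(c)
--     return len(stack)
-- ===== SOURCE B (Python) =====
-- def _removeFirst(s):
--     # index of the first adjacent reacting pair, removed; None if none exists
--     for i in range(len(s) - 1):
--         if abs(ord(s[i]) - ord(s[i + 1])) == 32: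
--             return s[:i] + s[i + 2:]
--     return None
--
--
-- def computeLength(s: str) -> int:
--     while True:
--         t = _removeFirst(s)
--         if t is None:
--             return len(s)
--         s = t
-- ===== Notes on version B (the rewrite author's own statement) =====
-- stated objective: alternative
-- what changed: Replaces the single left-to-right stack pass with repeated deletion of the first adjacent reacting pair, rescanning from the front until no pair remains (leftmost-redex reduction to a fixpoint).
import Mathlib
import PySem

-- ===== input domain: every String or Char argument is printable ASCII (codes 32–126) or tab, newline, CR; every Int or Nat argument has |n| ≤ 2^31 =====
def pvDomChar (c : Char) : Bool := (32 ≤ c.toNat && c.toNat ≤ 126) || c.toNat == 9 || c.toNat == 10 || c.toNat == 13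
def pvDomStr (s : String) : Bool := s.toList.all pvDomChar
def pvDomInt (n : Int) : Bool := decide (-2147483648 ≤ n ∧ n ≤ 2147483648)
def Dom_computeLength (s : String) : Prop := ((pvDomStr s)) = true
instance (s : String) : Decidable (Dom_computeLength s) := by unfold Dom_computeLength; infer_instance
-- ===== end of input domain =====

-- B replaces A's single stack pass by repeated deletion of the first adjacent reacting
-- pair (rescan from the front to a fixpoint): an alternative algorithm, not faster.

-- ===== PORT A =====
-- abs(ord(c) - ord(d)) == 32
def pvReact (c d : Char) : Bool := ((c.toNat : Int) - (d.toNat : Int)).natAbs == 32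

-- A's loop body: the stack is a list with head = top (deque append/pop at the right)
def pvPush (st : List Char) (c : Char) : List Char :=
  if st.length = 0 then c :: st
  else
    match st with
    | [] => c :: st
    | t :: r => if pvReact c t then r else c :: t :: r

def computeLength (s : String) : Int :=
  ((s.toList.foldl pvPush []).length : Int)

-- ===== PORT B =====
-- Source B _removeFirst: remove the first adjacent reacting pair, None if there is none
def pvRemoveFirst : List Char → Option (List Char)
  | x :: y :: r => if pvReact x y then some r else (pvRemoveFirst (y :: r)).map (x :: ·)
  | _ => none

theorem pvRemoveFirst_length : ∀ (l t : List Char), pvRemoveFirst l = some t → t.length < l.length := by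
  intro l
  induction l with
  | nil => intro t h; simp [pvRemoveFirst] at h
  | cons x r ih =>
    intro t h
    match r, h with
    | y :: r', hsome =>
      simp only [pvRemoveFirst] at hsome
      split at hsome
      · cases hsome; simp
      · simp only [Option.map_eq_some_iff] at hsome
        obtain ⟨t', ht', rfl⟩ := hsome
        have ht := ih t' ht'
        simpa using Nat.succ_lt_succ ht

-- Source B while-loop: iterate until no reacting pair remains, then return the length
def pvReduceLoop (l : List Char) : Int :=
  match h : pvRemoveFirst l with
  | none => (l.length : Int)
  | some t => pvReduceLoop t
termination_by l.length
decreasing_by exact pvRemoveFirst_length l t h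

def computeLength_alt (s : String) : Int := pvReduceLoop s.toList

-- ===== PRECONDITION & SPEC =====
def Spec_computeLength (s : String) (out : Int) : Prop := out = computeLength_alt s
instance (s : String) (out : Int) : Decidable (Spec_computeLength s out) := by unfold Spec_computeLength; infer_instance

-- ===== CLAIM (what is proved, stated in full; the proofs are below) =====
def Claim_equal_computeLength : Prop := ∀ (s : String), Dom_computeLength s → Spec_computeLength s (computeLength s)

-- ===== LEMMAS AND PROOFS =====

theorem pvReact_comm (a b : Char) : pvReact a b = pvReact b a := by
  simp only [pvReact]
  rw [show ((a.toNat : Int) - (b.toNat : Int)).natAbs = ((b.toNat : Int) - (a.toNat : Int)).natAbs by omega]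

theorem pvReduceLoop_none {l : List Char} (h : pvRemoveFirst l = none) :
    pvReduceLoop l = (l.length : Int) := by
  rw [pvReduceLoop]
  split
  · rfl
  · rename_i t h'; rw [h] at h'; cases h'

theorem pvReduceLoop_step {l t : List Char} (h : pvRemoveFirst l = some t) :
    pvReduceLoop l = pvReduceLoop t := by
  rw [pvReduceLoop]
  split
  · rename_i h'; rw [h] at h'; cases h'
  · rename_i t' h'; rw [h] at h'; cases h'; rfl

-- an adjacent-nonreacting list has no pair to remove
theorem pvRemoveFirst_of_chain : ∀ (l : List Char),
    List.IsChain (fun a b => pvReact a b = false) l → pvRemoveFirst l = none := by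
  intro l
  induction l with
  | nil => intro _; rfl
  | cons x r ih =>
    intro hch
    match r with
    | [] => rfl
    | y :: r' =>
      rw [List.isChain_cons_cons] at hch
      simp only [pvRemoveFirst, hch.1]
      simp [ih hch.2]

-- the first reacting pair of p ++ x :: y :: r is (x, y) when p ++ [x] is nonreacting
theorem pvRemoveFirst_concat : ∀ (p : List Char) (x y : Char) (r : List Char),
    List.IsChain (fun a b => pvReact a b = false) (p ++ [x]) → pvReact x y = true →
    pvRemoveFirst (p ++ x :: y :: r) = some (p ++ r) := by
  intro p
  induction p with
  | nil => intro x y r _ hxy; simp [pvRemoveFirst, hxy]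
  | cons a p' ih =>
    intro x y r hch hxy
    match p' with
    | [] =>
      simp only [List.singleton_append] at hch ⊢
      rw [List.isChain_cons_cons] at hch
      simp only [pvRemoveFirst, hch.1]
      simp [hxy]
    | b :: p'' =>
      rw [List.cons_append, List.cons_append, List.isChain_cons_cons] at hch
      have hrec := ih x y r hch.2 hxy
      rw [List.cons_append]
      show pvRemoveFirst (a :: b :: (p'' ++ x :: y :: r)) = _
      simp only [pvRemoveFirst, hch.1]
      simp only [List.cons_append] at hrec
      simp [hrec]

theorem pvChain_reverse {l : List Char}
    (h : List.IsChain (fun a b => pvReact a b = false) l) :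
    List.IsChain (fun a b => pvReact a b = false) l.reverse := by
  rw [List.isChain_reverse]
  exact h.imp (fun a b hab => by rw [pvReact_comm]; exact hab)

-- main invariant: running B on (reversed stack ++ rest) equals finishing A's fold
theorem pvKey : ∀ (l st : List Char),
    List.IsChain (fun a b => pvReact a b = false) st →
    pvReduceLoop (st.reverse ++ l) = ((l.foldl pvPush st).length : Int) := by
  intro l
  induction l with
  | nil =>
    intro st hst
    rw [List.append_nil, List.foldl_nil,
      pvReduceLoop_none (pvRemoveFirst_of_chain _ (pvChain_reverse hst))]
    simp
  | cons c l' ih =>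
    intro st hst
    rw [List.foldl_cons]
    match st with
    | [] =>
      have hp : pvPush [] c = [c] := rfl
      rw [hp]
      simpa using ih [c] (List.isChain_singleton c)
    | t :: st' =>
      by_cases hr : pvReact c t = true
      · have hpush : pvPush (t :: st') c = st' := by
          simp [pvPush, hr]
        rw [hpush]
        have hrev : (t :: st').reverse ++ c :: l' = st'.reverse ++ t :: c :: l' := by
          simp
        have hchain : List.IsChain (fun a b => pvReact a b = false) (st'.reverse ++ [t]) := by
          have := pvChain_reverse hst
          simpa using this
        rw [hrev, pvReduceLoop_step
          (pvRemoveFirst_concat st'.reverse t c l' hchain (by rw [pvReact_comm]; exact hr))]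
        exact ih st' (hst.tail)
      · have hpush : pvPush (t :: st') c = c :: t :: st' := by
          simp [pvPush, hr]
        rw [hpush]
        have hrev : (t :: st').reverse ++ c :: l' = (c :: t :: st').reverse ++ l' := by
          simp
        rw [hrev]
        exact ih (c :: t :: st') (by
          rw [List.isChain_cons_cons]
          exact ⟨Bool.not_eq_true _ ▸ hr, hst⟩)

-- ===== VERDICT (by name: the statement is the Claim_ definition above) =====
theorem computeLength_spec : Claim_equal_computeLength := by
  intro s _
  unfold Spec_computeLength computeLength computeLength_alt
  have := pvKey s.toList [] (by simp)
  simpa using this.symm
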